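-- pv_equiv track=rewrite | github.com/TarandeepNandhra/cs61a | hw02/hw02_rec.py | missing_digits
-- ===== SOURCE A (Python) =====
-- def split(n):
--     return n // 10, n % 10
--
-- def missing_digits(n):
--     """Given a number a that is in sorted, increasing order,
--     return the number of missing digits in n. A missing digit is
--     a number between the first and last digit of a that is not in n.
--     >>> missing_digits(1248) # 3, 5, 6, 7
--     4
--     >>> missing_digits(1122) # No missing numbers
--     0
--     >>> missing_digits(123456) # No missing numbers
--     0
--     >>> missing_digits(3558) # 4, 6, 7
--     3
--     >>> missing_digits(35578) # 4, 6
--     2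
--     >>> missing_digits(12456) # 3
--     1
--     >>> missing_digits(16789) # 2, 3, 4, 5
--     4
--     >>> missing_digits(19) # 2, 3, 4, 5, 6, 7, 8
--     7
--     >>> missing_digits(4) # No missing numbers between 4 and 4
--     0
--     >>> from construct_check import check
--     >>> # ban while or for loops
--     >>> check(HW_SOURCE_FILE, 'missing_digits', ['While', 'For'])
--     True
--     """
--     "*** YOUR CODE HERE ***"
--     n_but_last , last1 = split(n)
--     last2 = split(n_but_last)[1]
--
--     if n_but_last == 0: # single digit number
--         return 0
--     if last1 == last2: # repeated digit
--         return missing_digits(n_but_last)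
--
--     return missing_digits(n_but_last) + last1 - last2 -1
-- ===== SOURCE B (Python) =====
-- def missing_digits(n):
--     digits = []
--     while n > 9:
--         n, d = divmod(n, 10)
--         digits.append(d)
--     digits.append(n)
--     changes = sum(a != b for a, b in zip(digits, digits[1:]))
--     return digits[0] - digits[-1] - changes
-- ===== Notes on version B (the rewrite author's own statement) =====
-- stated objective: simpler
-- what changed: Replaces the pairwise recursion over adjacent digits with one iterative divmod digit-extraction pass and the arithmetic identity answer = last_digit - first_digit - (number of adjacent digit changes).
import Mathlib
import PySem

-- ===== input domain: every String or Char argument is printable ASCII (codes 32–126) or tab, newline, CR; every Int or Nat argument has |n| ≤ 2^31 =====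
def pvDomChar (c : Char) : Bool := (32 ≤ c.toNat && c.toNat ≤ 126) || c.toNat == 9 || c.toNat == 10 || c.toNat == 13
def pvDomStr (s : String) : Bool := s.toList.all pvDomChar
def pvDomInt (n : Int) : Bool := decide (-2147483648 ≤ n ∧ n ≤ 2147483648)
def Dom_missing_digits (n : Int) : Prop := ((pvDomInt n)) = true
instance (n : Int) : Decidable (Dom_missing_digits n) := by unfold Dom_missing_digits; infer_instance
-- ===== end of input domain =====

-- B replaces A's recursion over adjacent digit pairs with one digit-extraction pass and the
-- identity: answer = last digit - first digit - (number of adjacent digit changes).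

-- ===== PORT A =====
-- split(n) returns (n // 10, n % 10); inlined below as floordiv/mod.
-- Literal port of A; on n < 0 Python recurses without bound (excluded by Pre_), the guard only makes the port total.
def missing_digits (n : Int) : Int :=
  if _hneg : n < 0 then 0
  else if _h0 : PySem.Int.floordiv n 10 = 0 then 0  -- single digit number
  else if PySem.Int.mod n 10 = PySem.Int.mod (PySem.Int.floordiv n 10) 10 then  -- repeated digit
    missing_digits (PySem.Int.floordiv n 10)
  else
    missing_digits (PySem.Int.floordiv n 10)
      + PySem.Int.mod n 10 - PySem.Int.mod (PySem.Int.floordiv n 10) 10 - 1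
termination_by n.toNat
decreasing_by
  all_goals rw [PySem.Int.floordiv_eq_ediv_of_pos (by omega)] at *; omega

-- ===== PORT B =====
-- the `digits` list Source B builds by repeated divmod: the digits of n, last digit first
def digitsRev (n : Int) : List Int :=
  if _h : n > 9 then PySem.Int.mod n 10 :: digitsRev (PySem.Int.floordiv n 10)
  else [n]
termination_by n.toNat
decreasing_by
  rw [PySem.Int.floordiv_eq_ediv_of_pos (by omega)]
  omega

-- changes = sum(a != b for a, b in zip(digits, digits[1:]))
def changes : List Int → Int
  | a :: b :: rest => (if a ≠ b then 1 else 0) + changes (b :: rest)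
  | _ => 0

def missing_digits_alt (n : Int) : Int :=
  let digits := digitsRev n
  digits.head! - digits.getLast! - changes digits

-- ===== PRECONDITION & SPEC =====
-- Pre_ excludes exactly the negative n, on which Python A recurses without bound (RecursionError).
def Pre_missing_digits (n : Int) : Prop := 0 ≤ n
instance (n : Int) : Decidable (Pre_missing_digits n) := by unfold Pre_missing_digits; infer_instance

def pvWitness_missing_digits : Int := 1248

def Spec_missing_digits (n : Int) (out : Int) : Prop := out = missing_digits_alt n
instance (n : Int) (out : Int) : Decidable (Spec_missing_digits n out) := by unfold Spec_missing_digits; infer_instance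

-- ===== CLAIM (what is proved, stated in full; the proofs are below) =====
def Claim_equal_missing_digits : Prop := ∀ (n : Int), Dom_missing_digits n → Pre_missing_digits n → Spec_missing_digits n (missing_digits n)

-- ===== LEMMAS AND PROOFS =====

lemma digitsRev_ne_nil (n : Int) : digitsRev n ≠ [] := by
  unfold digitsRev; split <;> simp

lemma digitsRev_head (n : Int) (h : 0 ≤ n) : (digitsRev n).head! = PySem.Int.mod n 10 := by
  unfold digitsRev
  split
  · simp
  · have hm : PySem.Int.mod n 10 = n % 10 := PySem.Int.mod_eq_emod_of_pos (by omega)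
    rw [hm]; simp; omega

-- closed-form value of B on single-digit (and zero) inputs
lemma alt_small (n : Int) (h9 : ¬ n > 9) : missing_digits_alt n = 0 := by
  unfold missing_digits_alt digitsRev
  simp [h9, changes]

-- B satisfies A's recurrence on multi-digit inputs
lemma alt_step (n : Int) (_h : 0 ≤ n) (h9 : n > 9) :
    missing_digits_alt n =
      missing_digits_alt (PySem.Int.floordiv n 10)
        + PySem.Int.mod n 10 - PySem.Int.mod (PySem.Int.floordiv n 10) 10
        - (if PySem.Int.mod n 10 = PySem.Int.mod (PySem.Int.floordiv n 10) 10 then 0 else 1) := by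
  have hq : 0 ≤ PySem.Int.floordiv n 10 := by
    rw [PySem.Int.floordiv_eq_ediv_of_pos (by omega)]; omega
  have hcons : digitsRev n = PySem.Int.mod n 10 :: digitsRev (PySem.Int.floordiv n 10) := by
    rw [digitsRev]; simp [h9]
  obtain ⟨d, rest, hds⟩ : ∃ d rest, digitsRev (PySem.Int.floordiv n 10) = d :: rest :=
    List.exists_cons_of_ne_nil (digitsRev_ne_nil _)
  have hd : d = PySem.Int.mod (PySem.Int.floordiv n 10) 10 := by
    have h := digitsRev_head (PySem.Int.floordiv n 10) hq
    rw [hds] at h; simp only [List.head!_cons] at h; exact h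
  have hlast : ∀ (a b : Int) (r : List Int), (a :: b :: r).getLast! = (b :: r).getLast! :=
    fun _ _ _ => rfl
  unfold missing_digits_alt
  rw [hcons, hds, hd]
  simp only [List.head!_cons, hlast, changes]
  split <;> rename_i hc
  · ring
  · rw [if_pos (not_ne_iff.mp hc)]; ring

lemma main_ind (k : Nat) : ∀ n : Int, 0 ≤ n → n < (k : Int) →
    missing_digits n = missing_digits_alt n := by
  induction k with
  | zero => intro n h0 hlt; omega
  | succ k ih =>
    intro n h0 hlt
    rw [missing_digits]
    have hq10 : PySem.Int.floordiv n 10 = n / 10 :=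
      PySem.Int.floordiv_eq_ediv_of_pos (by omega)
    by_cases h0q : PySem.Int.floordiv n 10 = 0
    · have h9 : ¬ n > 9 := by rw [hq10] at h0q; omega
      rw [dif_neg (show ¬ n < 0 by omega), dif_pos h0q]
      exact (alt_small n h9).symm
    · have h9 : n > 9 := by rw [hq10] at h0q; omega
      have hrec : missing_digits (PySem.Int.floordiv n 10) = missing_digits_alt (PySem.Int.floordiv n 10) := by
        apply ih <;> rw [hq10] <;> omega
      rw [alt_step n h0 h9, dif_neg (show ¬ n < 0 by omega), dif_neg h0q]
      split <;> rename_i hc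
      · rw [hrec, hc]; ring
      · rw [hrec]

-- ===== VERDICT (by name: the statement is the Claim_ definition above) =====
theorem missing_digits_spec : Claim_equal_missing_digits := by
  intro n _ hpre
  exact main_ind (n.toNat + 1) n hpre (by omega)
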